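-- pv_equiv track=rewrite | github.com/Strand94/TBA4560 | apps/eddies/cygnss/opendap.py | separate_tracks
-- ===== SOURCE A (Python) =====
-- def separate_tracks(grid):
--     track_list = []
--     previous_timestamp = -9
--     previous_ddm = -9
--     current_track = []
--
--     for measure in grid:
--         if not previous_timestamp+1 == measure[2] or not measure[3] == previous_ddm:
--             track_list.append(current_track)
--             current_track = [measure]
--         else:
--             current_track.append(measure)
--
--         previous_ddm = measure[3]
--         previous_timestamp = measure[2]
--     del track_list[0]
--     track_list.append(current_track)
--
--     return track_list
-- ===== SOURCE B (Python) =====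
-- def separate_tracks(grid):
--     tracks = []
--     i = 0
--     n = len(grid)
--     while i < n:
--         j = i + 1
--         while j < n and grid[j][2] == grid[j-1][2] + 1 and grid[j][3] == grid[j-1][3]:
--             j += 1
--         tracks.append(grid[i:j])
--         i = j
--     return tracks
-- ===== Notes on version B (the rewrite author's own statement) =====
-- stated objective: simpler
-- what changed: Replaced A's single accumulating fold with sentinel previous-state (-9,-9), a live current_track and a post-hoc del of the phantom first track by a nested scan: an inner loop finds the end of each maximal consecutive run and the run is emitted as one slice, with no sentinel and no deletion.
-- intended difference: On nonempty grids whose first measurement has timestamp -8 and ddm -9, A's sentinel state (-9,-9) treats that measurement as continuing a phantom track, so 'del track_list[0]' silently drops the entire first run and A omits the first track; B returns the full list of tracks including the first, which is the intended split. — e.g. on separate_tracks([(0, 0, -8, -9), (0, 0, 0, 0)]): A returns [[(0, 0, 0, 0)]], B returns [[(0, 0, -8, -9)], [(0, 0, 0, 0)]]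
import Mathlib
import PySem

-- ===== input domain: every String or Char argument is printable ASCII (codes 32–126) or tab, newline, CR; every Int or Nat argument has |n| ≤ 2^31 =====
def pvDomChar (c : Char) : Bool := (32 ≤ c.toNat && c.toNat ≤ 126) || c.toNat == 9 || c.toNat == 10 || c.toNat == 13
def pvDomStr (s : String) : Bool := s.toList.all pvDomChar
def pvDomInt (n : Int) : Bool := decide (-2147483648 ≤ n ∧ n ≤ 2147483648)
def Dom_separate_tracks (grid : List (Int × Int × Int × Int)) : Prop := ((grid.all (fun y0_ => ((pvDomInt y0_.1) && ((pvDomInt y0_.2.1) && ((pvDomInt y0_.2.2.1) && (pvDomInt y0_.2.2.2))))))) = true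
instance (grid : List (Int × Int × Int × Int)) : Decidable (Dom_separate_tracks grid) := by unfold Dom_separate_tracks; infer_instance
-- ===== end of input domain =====

-- B replaces A's sentinel-state fold (with its phantom first track and post-hoc del)
-- by a nested scan that emits each maximal consecutive run directly: simpler.
-- ===== PORT A =====
-- loop body of A: state = (track_list, previous_timestamp, previous_ddm, current_track)
def pvStepA (st : List (List (Int × Int × Int × Int)) × Int × Int × List (Int × Int × Int × Int))
    (measure : Int × Int × Int × Int) :
    List (List (Int × Int × Int × Int)) × Int × Int × List (Int × Int × Int × Int) :=
  if ¬(st.2.1 + 1 = measure.2.2.1) ∨ ¬(measure.2.2.2 = st.2.2.1) then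
    (st.1 ++ [st.2.2.2], measure.2.2.1, measure.2.2.2, [measure])
  else
    (st.1, measure.2.2.1, measure.2.2.2, st.2.2.2 ++ [measure])

def separate_tracks (grid : List (Int × Int × Int × Int)) : List (List (Int × Int × Int × Int)) :=
  let s := grid.foldl pvStepA ([], -9, -9, [])
  s.1.tail ++ [s.2.2.2]   -- 'del track_list[0]' raises IndexError when track_list is empty; such inputs are outside Pre_

-- ===== PORT B =====
-- inner while loop of Source B viewed on the suffix: extend the run from previous element p
-- while the consecutive-timestamp / same-ddm test holds; returns (run, remaining suffix)
def pvTakeRun : (Int × Int × Int × Int) → List (Int × Int × Int × Int) →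
    List (Int × Int × Int × Int) × List (Int × Int × Int × Int)
  | p, [] => ([p], [])
  | p, c :: rest =>
    if c.2.2.1 = p.2.2.1 + 1 ∧ c.2.2.2 = p.2.2.2 then
      (p :: (pvTakeRun c rest).1, (pvTakeRun c rest).2)
    else ([p], c :: rest)

theorem pvTakeRun_snd_length : ∀ (p : Int × Int × Int × Int) (xs : List (Int × Int × Int × Int)),
    (pvTakeRun p xs).2.length ≤ xs.length := by
  intro p xs
  induction xs generalizing p with
  | nil => simp [pvTakeRun]
  | cons c rest ih =>
    simp only [pvTakeRun]
    split
    · exact Nat.le_succ_of_le (ih c)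
    · simp

-- outer while loop of Source B: emit one maximal run per iteration
def separate_tracks_alt : List (Int × Int × Int × Int) → List (List (Int × Int × Int × Int))
  | [] => []
  | m :: rest => (pvTakeRun m rest).1 :: separate_tracks_alt (pvTakeRun m rest).2
termination_by l => l.length
decreasing_by exact Nat.lt_succ_of_le (pvTakeRun_snd_length m rest)

-- ===== PRECONDITION & SPEC =====
-- A returns the wrong value on grids whose first measurement matches A's sentinel state
-- (-9,-9): there A merges it into the phantom track and 'del track_list[0]' drops the
-- whole first run; B returns all runs, which is the intended split.
def D_separate_tracks (grid : List (Int × Int × Int × Int)) : Prop :=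
  (grid.map (fun m => (m.2.2.1, m.2.2.2))).head? = some (-8, -9)
instance (grid : List (Int × Int × Int × Int)) : Decidable (D_separate_tracks grid) := by
  unfold D_separate_tracks; infer_instance

-- Pre_ excludes exactly the inputs where A raises IndexError at 'del track_list[0]':
-- the empty grid, and grids that start at the sentinel (-8,-9) and are one single
-- consecutive chain, so that A never pushes a track before the del.
def Pre_separate_tracks (grid : List (Int × Int × Int × Int)) : Prop :=
  grid ≠ [] ∧ ¬(D_separate_tracks grid ∧
    ((grid.zip grid.tail).all
      (fun p => p.2.2.2.1 == p.1.2.2.1 + 1 && (p.2.2.2.2 == p.1.2.2.2))) = true)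
instance (grid : List (Int × Int × Int × Int)) : Decidable (Pre_separate_tracks grid) := by
  unfold Pre_separate_tracks; infer_instance

def pvWitness_separate_tracks : (List (Int × Int × Int × Int)) := [(1, 2, 3, 4)]

def Spec_separate_tracks (grid : List (Int × Int × Int × Int)) (out : List (List (Int × Int × Int × Int))) : Prop :=
  ¬ D_separate_tracks grid → out = separate_tracks_alt grid
instance (grid : List (Int × Int × Int × Int)) (out : List (List (Int × Int × Int × Int))) : Decidable (Spec_separate_tracks grid out) := by
  unfold Spec_separate_tracks; infer_instance

def pvDiffWitness_separate_tracks : (List (Int × Int × Int × Int)) := [(0, 0, -8, -9), (0, 0, 0, 0)]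
def pvDiffWitnessOut_separate_tracks : (List (List (Int × Int × Int × Int))) × (List (List (Int × Int × Int × Int))) :=
  ([[(0, 0, 0, 0)]], [[(0, 0, -8, -9)], [(0, 0, 0, 0)]])

-- ===== CLAIM (what is proved, stated in full; the proofs are below) =====
def Claim_unchanged_separate_tracks : Prop := ∀ (grid : List (Int × Int × Int × Int)), Dom_separate_tracks grid → Pre_separate_tracks grid → Spec_separate_tracks grid (separate_tracks grid)
def Claim_changed_separate_tracks : Prop := Dom_separate_tracks (pvDiffWitness_separate_tracks) ∧ Pre_separate_tracks (pvDiffWitness_separate_tracks) ∧ D_separate_tracks (pvDiffWitness_separate_tracks) ∧ separate_tracks (pvDiffWitness_separate_tracks) = pvDiffWitnessOut_separate_tracks.1 ∧ separate_tracks_alt (pvDiffWitness_separate_tracks) = pvDiffWitnessOut_separate_tracks.2 ∧ pvDiffWitnessOut_separate_tracks.1 ≠ pvDiffWitnessOut_separate_tracks.2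
def Claim_exact_separate_tracks : Prop := ∀ (grid : List (Int × Int × Int × Int)), Dom_separate_tracks grid → Pre_separate_tracks grid → D_separate_tracks grid → separate_tracks grid ≠ separate_tracks_alt grid

-- ===== LEMMAS AND PROOFS =====

-- core invariant: from a state whose previous fields come from the last element p of the
-- current track, A's remaining fold produces exactly B's run decomposition
theorem pvCore : ∀ (xs : List (Int × Int × Int × Int)) (p : Int × Int × Int × Int)
    (acc : List (List (Int × Int × Int × Int))) (c0 : List (Int × Int × Int × Int)),
    (let s := List.foldl pvStepA (acc, p.2.2.1, p.2.2.2, c0 ++ [p]) xs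
     s.1 ++ [s.2.2.2])
      = acc ++ ((c0 ++ (pvTakeRun p xs).1) :: separate_tracks_alt (pvTakeRun p xs).2) := by
  intro xs
  induction xs with
  | nil => intro p acc c0; simp [pvTakeRun, separate_tracks_alt]
  | cons c rest ih =>
    intro p acc c0
    by_cases h : c.2.2.1 = p.2.2.1 + 1 ∧ c.2.2.2 = p.2.2.2
    · have hA : ¬(¬(p.2.2.1 + 1 = c.2.2.1) ∨ ¬(c.2.2.2 = p.2.2.2)) := by
        push_neg; exact ⟨h.1.symm, h.2⟩
      simp only [List.foldl_cons, pvStepA, if_neg hA, pvTakeRun, if_pos h]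
      have := ih c acc (c0 ++ [p])
      simp only [List.append_assoc, List.singleton_append] at this ⊢
      exact this
    · have hA : (¬(p.2.2.1 + 1 = c.2.2.1) ∨ ¬(c.2.2.2 = p.2.2.2)) := by
        by_contra hc
        push_neg at hc
        exact h ⟨hc.1.symm, hc.2⟩
      simp only [List.foldl_cons, pvStepA, if_pos hA, pvTakeRun, if_neg h]
      have := ih c (acc ++ [c0 ++ [p]]) []
      simp only [List.nil_append, List.append_assoc, List.singleton_append] at this
      rw [this]
      simp [separate_tracks_alt]

theorem pvTailLem {α : Type} (s1 : List α) (x y : α) (L : List α)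
    (h : s1 ++ [x] = y :: L) (hL : L ≠ []) : s1.tail ++ [x] = L := by
  cases s1 with
  | nil =>
    simp only [List.nil_append, List.cons.injEq] at h
    exact absurd h.2 (Ne.symm hL)
  | cons a t =>
    simp at h
    simpa using h.2

-- the single-chain inputs are exactly those where B's first run consumes everything
theorem pvChainIff : ∀ (xs : List (Int × Int × Int × Int)) (p : Int × Int × Int × Int),
    (((p :: xs).zip (p :: xs).tail).all
      (fun q => q.2.2.2.1 == q.1.2.2.1 + 1 && (q.2.2.2.2 == q.1.2.2.2))) = true ↔
      (pvTakeRun p xs).2 = [] := by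
  intro xs
  induction xs with
  | nil => intro p; simp [pvTakeRun]
  | cons c rest ih =>
    intro p
    simp only [List.tail_cons, List.zip_cons_cons, List.all_cons, Bool.and_eq_true, beq_iff_eq]
    by_cases h : c.2.2.1 = p.2.2.1 + 1 ∧ c.2.2.2 = p.2.2.2
    · simp only [pvTakeRun, if_pos h]
      have := ih c
      simp only [List.tail_cons] at this
      rw [← this]
      exact ⟨fun hh => hh.2, fun hh => ⟨⟨h.1, h.2⟩, hh⟩⟩
    · simp only [pvTakeRun, if_neg h]
      constructor
      · intro hh; exact absurd ⟨hh.1.1, hh.1.2⟩ h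
      · intro hh; exact absurd hh (List.cons_ne_nil c rest)

-- after A processes the first measurement m of a grid with ¬D_, A's final track list
-- (before the del, with phantom first) is [] :: B's result
theorem pvA_eq_alt (m : Int × Int × Int × Int) (rest : List (Int × Int × Int × Int))
    (hD : ¬ D_separate_tracks (m :: rest)) :
    separate_tracks (m :: rest) = separate_tracks_alt (m :: rest) := by
  have hsent : ¬(m.2.2.1 = -8 ∧ m.2.2.2 = -9) := by
    intro hc
    apply hD
    unfold D_separate_tracks
    rw [List.map_cons, List.head?_cons]
    exact congrArg some (Prod.ext_iff.mpr ⟨hc.1, hc.2⟩)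
  have hA : (¬((-9 : Int) + 1 = m.2.2.1) ∨ ¬(m.2.2.2 = -9)) := by
    by_contra hc
    push_neg at hc
    exact hsent ⟨by omega, hc.2⟩
  unfold separate_tracks
  simp only [List.foldl_cons, pvStepA, if_pos hA, List.nil_append]
  have hcore := pvCore rest m [([] : List (Int × Int × Int × Int))] []
  simp only [List.nil_append, List.singleton_append] at hcore
  have halt : separate_tracks_alt (m :: rest)
      = (pvTakeRun m rest).1 :: separate_tracks_alt (pvTakeRun m rest).2 := by
    simp [separate_tracks_alt]
  rw [halt]
  exact pvTailLem _ _ _ _ hcore (List.cons_ne_nil _ _)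

theorem pvA_tail (m : Int × Int × Int × Int) (rest : List (Int × Int × Int × Int))
    (hD : D_separate_tracks (m :: rest))
    (hP : Pre_separate_tracks (m :: rest)) :
    separate_tracks (m :: rest) = separate_tracks_alt (pvTakeRun m rest).2 := by
  have hsent : m.2.2.1 = -8 ∧ m.2.2.2 = -9 := by
    unfold D_separate_tracks at hD
    simp at hD
    exact ⟨by rw [hD], by rw [hD]⟩
  have hA : ¬(¬((-9 : Int) + 1 = m.2.2.1) ∨ ¬(m.2.2.2 = -9)) := by
    push_neg
    exact ⟨by omega, hsent.2⟩
  have hrem : (pvTakeRun m rest).2 ≠ [] := by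
    intro hc
    apply hP.2
    refine ⟨hD, ?_⟩
    have := (pvChainIff rest m).mpr hc
    simpa using this
  unfold separate_tracks
  simp only [List.foldl_cons, pvStepA, if_neg hA, List.nil_append]
  have hcore := pvCore rest m [] []
  simp only [List.nil_append] at hcore
  have hrem' : separate_tracks_alt (pvTakeRun m rest).2 ≠ [] := by
    cases hx : (pvTakeRun m rest).2 with
    | nil => exact absurd hx hrem
    | cons a t => simp [separate_tracks_alt]
  exact pvTailLem _ _ _ _ hcore hrem'

-- ===== VERDICT (by name: the statement is the Claim_ definition above) =====
theorem separate_tracks_spec : Claim_unchanged_separate_tracks := by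
  intro grid _ hP hD
  cases grid with
  | nil => exact absurd rfl hP.1
  | cons m rest => exact pvA_eq_alt m rest hD

theorem separate_tracks_changed : Claim_changed_separate_tracks := by
  unfold Claim_changed_separate_tracks
  refine ⟨by decide, by decide, by decide, by decide, ?_, by decide⟩
  simp [pvDiffWitness_separate_tracks, pvDiffWitnessOut_separate_tracks,
        separate_tracks_alt, pvTakeRun]

theorem separate_tracks_tight : Claim_exact_separate_tracks := by
  intro grid _ hP hD hc
  cases grid with
  | nil => exact absurd rfl hP.1
  | cons m rest =>
    rw [pvA_tail m rest hD hP] at hc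
    have halt : separate_tracks_alt (m :: rest)
        = (pvTakeRun m rest).1 :: separate_tracks_alt (pvTakeRun m rest).2 := by
      simp [separate_tracks_alt]
    rw [halt] at hc
    exact List.cons_ne_self _ _ hc.symm
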